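-- pv_equiv track=rewrite | github.com/veepsrock/who | zero_shot_scores.py | map_themes
-- ===== SOURCE A (Python) =====
-- def map_themes(themes, theme_dict):
--     if isinstance(themes, list):
--         big_themes = []
--         for theme in themes:
--             if theme is not None:
--                 for key, values in theme_dict.items():
--                     if theme in values:
--                         big_themes.append(key)
--                         break
--         return big_themes if big_themes else None
--     return None
-- ===== SOURCE B (Python) =====
-- def map_themes(themes, theme_dict):
--     if not isinstance(themes, list):
--         return None
--     index = {}
--     for key, values in theme_dict.items():
--         for v in values:
--             if v not in index:
--                 index[v] = key
--     big_themes = [index[t] for t in themes if t is not None and t in index]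
--     return big_themes or None
-- ===== Notes on version B (the rewrite author's own statement) =====
-- stated objective: faster
-- what changed: Replaces the per-theme nested scan over all dict entries with a reverse index (value -> first containing key) built once, then a single lookup pass over themes.
import Mathlib
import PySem

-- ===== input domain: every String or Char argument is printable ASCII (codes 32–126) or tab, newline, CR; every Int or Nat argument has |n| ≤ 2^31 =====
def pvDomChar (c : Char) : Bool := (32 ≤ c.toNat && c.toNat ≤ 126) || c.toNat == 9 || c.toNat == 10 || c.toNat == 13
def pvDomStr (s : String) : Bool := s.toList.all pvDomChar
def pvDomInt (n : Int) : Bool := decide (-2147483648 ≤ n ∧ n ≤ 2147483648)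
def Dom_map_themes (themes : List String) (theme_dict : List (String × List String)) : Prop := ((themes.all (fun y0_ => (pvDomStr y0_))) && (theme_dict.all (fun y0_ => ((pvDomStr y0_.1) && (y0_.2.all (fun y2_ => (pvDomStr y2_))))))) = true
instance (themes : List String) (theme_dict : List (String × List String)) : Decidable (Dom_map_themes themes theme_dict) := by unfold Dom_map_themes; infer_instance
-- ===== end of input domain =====

-- B builds a reverse index (value -> first containing key) once and then maps themes by lookup,
-- replacing A's per-theme scan over all dict entries; proved to return exactly A's value.


-- ===== PORT A =====
-- inner 'for key, values in theme_dict.items(): if theme in values: big_themes.append(key); break'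
def mapThemesInnerA (theme : String) (items : List (String × List String)) (acc : List String) : List String :=
  match items with
  | [] => acc
  | (key, values) :: rest =>
      if values.contains theme then acc ++ [key] else mapThemesInnerA theme rest acc

def map_themes (themes : List String) (theme_dict : List (String × List String)) : Option (List String) :=
  -- 'isinstance(themes, list)' is always true for a List String argument; the 'theme is not None'
  -- guard cannot fire (elements are strings), so the loop body runs for every theme.
  let big_themes := themes.foldl (fun acc theme => mapThemesInnerA theme theme_dict acc) []
  if big_themes.isEmpty then none else some big_themes

-- ===== PORT B =====
-- first pass: reverse index, value -> first key whose values contain it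
def buildIndex (theme_dict : List (String × List String)) : PySem.Dict String String :=
  theme_dict.foldl
    (fun d kv => kv.2.foldl (fun d v => if d.contains v then d else d.insert v kv.1) d)
    PySem.Dict.empty

def map_themes_alt (themes : List String) (theme_dict : List (String × List String)) : Option (List String) :=
  let index := buildIndex theme_dict
  -- '[index[t] for t in themes if t is not None and t in index]'
  let big_themes := themes.filterMap (fun t => index.get? t)
  if big_themes.isEmpty then none else some big_themes

-- ===== PRECONDITION & SPEC =====
def Spec_map_themes (themes : List String) (theme_dict : List (String × List String)) (out : Option (List String)) : Prop := out = map_themes_alt themes theme_dict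
instance (themes : List String) (theme_dict : List (String × List String)) (out : Option (List String)) : Decidable (Spec_map_themes themes theme_dict out) := by unfold Spec_map_themes; infer_instance

-- ===== CLAIM (what is proved, stated in full; the proofs are below) =====
def Claim_equal_map_themes : Prop := ∀ (themes : List String) (theme_dict : List (String × List String)), Dom_map_themes themes theme_dict → Spec_map_themes themes theme_dict (map_themes themes theme_dict)

-- ===== LEMMAS AND PROOFS =====

-- A's inner scan, as a function of the theme alone
def firstKey (theme : String) (items : List (String × List String)) : Option String :=
  match items with
  | [] => none
  | (key, values) :: rest => if values.contains theme then some key else firstKey theme rest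

lemma innerA_eq_firstKey (theme : String) (items : List (String × List String)) (acc : List String) :
    mapThemesInnerA theme items acc = acc ++ (firstKey theme items).toList := by
  induction items generalizing acc with
  | nil => simp [mapThemesInnerA, firstKey]
  | cons kv rest ih =>
      obtain ⟨k, vs⟩ := kv
      by_cases h : theme ∈ vs
      · simp [mapThemesInnerA, firstKey, h]
      · simp [mapThemesInnerA, firstKey, h, ih]

-- the inner foldl of buildIndex: lookup afterwards = old lookup, else first hit in this values list
lemma get?_innerFold (vs : List String) (k : String) (d : PySem.Dict String String) (t : String) :
    ((vs.foldl (fun d v => if d.contains v then d else d.insert v k) d).get? t)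
      = match d.get? t with
        | some w => some w
        | none => if vs.contains t then some k else none := by
  induction vs generalizing d with
  | nil => cases h : d.get? t <;> simp [h]
  | cons v vs ih =>
      by_cases hc : d.contains v
      · rw [List.foldl_cons, if_pos hc, ih]
        cases h : d.get? t with
        | some w => simp
        | none =>
            have hvt : v ≠ t := by
              intro he; subst he
              rw [PySem.Dict.contains_eq_isSome_get?, h] at hc; simp at hc
            simp [Ne.symm hvt]
      · rw [List.foldl_cons, if_neg hc, ih]
        by_cases ht : t = v
        · subst ht
          have h : d.get? t = none := by
            rw [PySem.Dict.contains_eq_isSome_get?] at hc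
            cases h : d.get? t <;> simp [h] at hc ⊢
          simp [PySem.Dict.get?_insert_self, h]
        · rw [PySem.Dict.get?_insert]
          cases h : d.get? t <;> simp [ht]

lemma get?_buildFold (items : List (String × List String)) (d : PySem.Dict String String) (t : String) :
    ((items.foldl (fun d kv => kv.2.foldl (fun d v => if d.contains v then d else d.insert v kv.1) d) d).get? t)
      = match d.get? t with
        | some w => some w
        | none => firstKey t items := by
  induction items generalizing d with
  | nil => cases h : d.get? t <;> simp [firstKey, h]
  | cons kv rest ih =>
      obtain ⟨k, vs⟩ := kv
      rw [List.foldl_cons, ih, get?_innerFold]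
      cases h : d.get? t with
      | some w => simp
      | none =>
          by_cases hv : t ∈ vs
          · simp [firstKey, hv]
          · simp [firstKey, hv]

lemma get?_buildIndex (theme_dict : List (String × List String)) (t : String) :
    (buildIndex theme_dict).get? t = firstKey t theme_dict := by
  rw [buildIndex, get?_buildFold]
  simp [PySem.Dict.get?_empty]

lemma foldl_innerA_eq_filterMap (themes : List String) (theme_dict : List (String × List String))
    (acc : List String) :
    themes.foldl (fun acc theme => mapThemesInnerA theme theme_dict acc) acc
      = acc ++ themes.filterMap (fun t => firstKey t theme_dict) := by
  induction themes generalizing acc with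
  | nil => simp
  | cons t ts ih =>
      rw [List.foldl_cons, ih, innerA_eq_firstKey]
      cases h : firstKey t theme_dict <;> simp [h]

-- ===== VERDICT (by name: the statement is the Claim_ definition above) =====
theorem map_themes_spec : Claim_equal_map_themes := by
  intro themes theme_dict _
  unfold Spec_map_themes map_themes map_themes_alt
  have hfm : themes.filterMap (fun t => (buildIndex theme_dict).get? t)
      = themes.filterMap (fun t => firstKey t theme_dict) := by
    apply List.filterMap_congr
    intro t _
    exact get?_buildIndex theme_dict t
  simp only [foldl_innerA_eq_filterMap, List.nil_append, hfm]
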